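-- pv_equiv track=rewrite | github.com/grupy-sanca/dojos | 017/quadrado.py | valida
-- ===== SOURCE A (Python) =====
-- def é_mágica(matriz):
--     gabarito = list(range(1, 10))
--     for linha in matriz:
--         for num in linha:
--             try:
--                 gabarito.remove(num)
--             except ValueError:
--                 return False
--         if len(linha) != 3:
--             return False
--     return len(matriz)==3
--
-- def valida(matriz):
--     if not é_mágica(matriz):
--         return False
--     é_valida = True
--     sum = [ 0, 0, 0]
--     for linha in matriz:
--         é_valida = valida_vetor(linha)
--         if not é_valida:
--             return é_valida
--         sum[0] += linha[0]
--         sum[1] += linha[1]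
--         sum[2] += linha[2]
--     if(sum[0] != 15 or sum[1] != 15 or sum[2] != 15):
--         return False
--
--     if matriz[0][0] + matriz[1][1] + matriz[2][2] != 15:
--         return False
--     if matriz[0][2] + matriz[1][1] + matriz[2][0] != 15:
--         return False
--     return True
--
-- def valida_vetor(linha):
--     return sum(linha) == 15
-- ===== SOURCE B (Python) =====
-- def valida(matriz):
--     # structure: exactly 3 rows of 3 entries
--     if len(matriz) != 3 or any(len(linha) != 3 for linha in matriz):
--         return False
--     entradas = [x for linha in matriz for x in linha]
--     # nine entries, each of 1..9 exactly once => permutation of 1..9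
--     if any(entradas.count(k) != 1 for k in range(1, 10)):
--         return False
--     linhas = list(matriz)
--     linhas += [[matriz[i][j] for i in range(3)] for j in range(3)]
--     linhas.append([matriz[0][0], matriz[1][1], matriz[2][2]])
--     linhas.append([matriz[0][2], matriz[1][1], matriz[2][0]])
--     return all(sum(l) == 15 for l in linhas)
-- ===== Notes on version B (the rewrite author's own statement) =====
-- stated objective: simpler
-- what changed: Replaces A's three-stage check (a remove-from-gabarito helper, a row loop that interleaves row-sum tests with hand-accumulated column sums, and two inline diagonal tests) by a flat structure+count permutation check followed by one uniform all() over the eight explicitly built lines.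
import Mathlib
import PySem

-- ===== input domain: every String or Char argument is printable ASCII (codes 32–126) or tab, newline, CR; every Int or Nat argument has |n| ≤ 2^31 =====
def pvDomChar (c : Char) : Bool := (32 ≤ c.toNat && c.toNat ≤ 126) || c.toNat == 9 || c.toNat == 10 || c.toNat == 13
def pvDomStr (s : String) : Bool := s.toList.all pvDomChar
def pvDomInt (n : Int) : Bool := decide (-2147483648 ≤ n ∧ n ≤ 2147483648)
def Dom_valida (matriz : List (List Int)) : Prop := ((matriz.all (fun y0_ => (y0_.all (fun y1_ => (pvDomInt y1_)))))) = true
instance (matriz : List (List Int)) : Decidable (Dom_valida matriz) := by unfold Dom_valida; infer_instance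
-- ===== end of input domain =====

-- B replaces A's remove-from-gabarito helper + interleaved row/column accumulation + inline
-- diagonal tests by a flat structure+count permutation check and one uniform pass over the
-- eight explicitly built lines (objective: simpler).

-- ===== PORT A =====

-- sum(linha) == 15
def valida_vetor (linha : List Int) : Bool := (linha.foldl (· + ·) 0) == 15

-- the inner 'for num in linha: gabarito.remove(num)' loop (none = the ValueError branch)
def removeAll (gab : List Int) : List Int → Option (List Int)
  | [] => some gab
  | n :: rest =>
    match PySem.List.remove? gab n with
    | none => none
    | some g => removeAll g rest

-- the outer loop of é_mágica; 'matriz' is carried for the final 'len(matriz)==3'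
def emRows (matriz : List (List Int)) (gab : List Int) : List (List Int) → Bool
  | [] => matriz.length == 3
  | linha :: rest =>
    match removeAll gab linha with
    | none => false
    | some g => if linha.length == 3 then emRows matriz g rest else false

def eMagica (matriz : List (List Int)) : Bool :=
  emRows matriz (PySem.List.pyRange 1 10 1) matriz

-- the row loop of valida: row-sum early return + accumulation of the three column sums;
-- linha[0]/linha[1]/linha[2] are only reached under é_mágica (rows of length 3), so pyGetD is exact
def validaLoop (s0 s1 s2 : Int) : List (List Int) → Option (Int × Int × Int)
  | [] => some (s0, s1, s2)
  | linha :: rest =>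
    if valida_vetor linha then
      validaLoop (s0 + PySem.List.pyGetD linha 0 0) (s1 + PySem.List.pyGetD linha 1 0)
        (s2 + PySem.List.pyGetD linha 2 0) rest
    else none

def valida (matriz : List (List Int)) : Bool :=
  if !eMagica matriz then false
  else
    match validaLoop 0 0 0 matriz with
    | none => false
    | some (s0, s1, s2) =>
      if s0 != 15 || s1 != 15 || s2 != 15 then false
      else
        -- matriz[i][j] only reached under é_mágica (a 3x3 matrix), so pyGetD is exact
        let g := fun (i j : Int) => PySem.List.pyGetD (PySem.List.pyGetD matriz i []) j 0
        if g 0 0 + g 1 1 + g 2 2 != 15 then false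
        else if g 0 2 + g 1 1 + g 2 0 != 15 then false
        else true

-- ===== PORT B =====

def valida_alt (matriz : List (List Int)) : Bool :=
  if !(matriz.length == 3 && matriz.all (fun linha => linha.length == 3)) then false
  else
    let entradas := matriz.flatMap (fun linha => linha)
    if !((PySem.List.pyRange 1 10 1).all (fun k => PySem.List.count entradas k == 1)) then false
    else
      -- matriz[i][j]: the structure check guarantees a 3x3 matrix, so pyGetD is exact
      let g := fun (i j : Int) => PySem.List.pyGetD (PySem.List.pyGetD matriz i []) j 0
      let linhas := matriz
        ++ (PySem.List.pyRange 0 3 1).map (fun j => (PySem.List.pyRange 0 3 1).map (fun i => g i j))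
        ++ [[g 0 0, g 1 1, g 2 2], [g 0 2, g 1 1, g 2 0]]
      linhas.all (fun l => (l.foldl (· + ·) 0) == 15)

-- ===== PRECONDITION & SPEC =====
def Spec_valida (matriz : List (List Int)) (out : Bool) : Prop := out = valida_alt matriz
instance (matriz : List (List Int)) (out : Bool) : Decidable (Spec_valida matriz out) := by unfold Spec_valida; infer_instance

-- ===== CLAIM (what is proved, stated in full; the proofs are below) =====
def Claim_equal_valida : Prop := ∀ (matriz : List (List Int)), Dom_valida matriz → Spec_valida matriz (valida matriz)

-- ===== LEMMAS AND PROOFS =====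

theorem removeAll_perm {nums : List Int} : ∀ {gab r : List Int},
    removeAll gab nums = some r → (nums ++ r).Perm gab := by
  induction nums with
  | nil => intro gab r h; simp [removeAll] at h; simp [h]
  | cons n rest ih =>
    intro gab r h
    simp only [removeAll] at h
    cases hrem : PySem.List.remove? gab n with
    | none => rw [hrem] at h; exact absurd h (by simp)
    | some g =>
      rw [hrem] at h
      have hn : n ∈ gab := by
        by_contra hc
        rw [(PySem.List.remove?_eq_none_iff gab n).2 hc] at hrem; cases hrem
      rw [PySem.List.remove?_eq_some_erase gab n hn] at hrem
      obtain rfl : gab.erase n = g := by injection hrem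
      exact ((ih h).cons n).trans
        (List.cons_perm_iff_perm_erase.2 ⟨hn, List.Perm.refl _⟩)

theorem removeAll_some_of_perm {nums : List Int} : ∀ {gab : List Int},
    nums.Perm gab → ∃ r, removeAll gab nums = some r := by
  induction nums with
  | nil => intro gab _; exact ⟨gab, rfl⟩
  | cons n rest ih =>
    intro gab hp
    have h := List.cons_perm_iff_perm_erase.1 hp
    obtain ⟨r, hr⟩ := ih h.2
    refine ⟨r, ?_⟩
    simp only [removeAll, PySem.List.remove?_eq_some_erase gab n h.1, hr]

theorem removeAll_append (xs ys gab : List Int) :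
    removeAll gab (xs ++ ys) = (removeAll gab xs).bind (fun g => removeAll g ys) := by
  induction xs generalizing gab with
  | nil => simp [removeAll]
  | cons n rest ih =>
    simp only [List.cons_append, removeAll]
    cases PySem.List.remove? gab n with
    | none => rfl
    | some g => exact ih g

theorem emRows_iff (m : List (List Int)) : ∀ (rows : List (List Int)) (gab : List Int),
    emRows m gab rows = true ↔
      ((∃ r, removeAll gab (rows.flatMap (fun l => l)) = some r) ∧
        (∀ l ∈ rows, l.length = 3) ∧ m.length = 3) := by
  intro rows
  induction rows with
  | nil => intro gab; simp [emRows, removeAll]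
  | cons linha rest ih =>
    intro gab
    simp only [emRows]
    cases hrem : removeAll gab linha with
    | none =>
      simp only [List.flatMap_cons, removeAll_append, hrem, Option.bind_none]
      simp
    | some g =>
      simp only [List.flatMap_cons, removeAll_append, hrem, Option.bind_some]
      by_cases hl : linha.length = 3
      · simp [hl, ih g]
      · simp [hl]

theorem count_one_iff_perm (l : List Int) (h : l.length = 9) :
    (∀ k ∈ ([1,2,3,4,5,6,7,8,9] : List Int), l.count k = 1) ↔
      l.Perm [1,2,3,4,5,6,7,8,9] := by
  constructor
  · intro hc
    have hle : (([1,2,3,4,5,6,7,8,9] : List Int) : Multiset Int) ≤ (l : Multiset Int) := by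
      rw [Multiset.le_iff_count]
      intro a
      by_cases ha : a ∈ ([1,2,3,4,5,6,7,8,9] : List Int)
      · have h1 : Multiset.count a (([1,2,3,4,5,6,7,8,9] : List Int) : Multiset Int) = 1 := by
          rw [Multiset.coe_count]
          exact List.count_eq_one_of_mem (by decide) ha
        rw [h1, Multiset.coe_count, hc a ha]
      · rw [Multiset.count_eq_zero_of_notMem (by simpa using ha)]
        exact Nat.zero_le _
    have hcard : (l : Multiset Int).card ≤ (([1,2,3,4,5,6,7,8,9] : List Int) : Multiset Int).card := by
      simp [h]
    have := Multiset.eq_of_le_of_card_le hle hcard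
    exact Multiset.coe_eq_coe.1 this.symm
  · intro hp k hk
    rw [hp.count_eq]
    fin_cases hk <;> decide

-- é_mágica characterized: 3 rows, each of length 3, entries a permutation of 1..9
theorem eMagica_iff (m : List (List Int)) :
    eMagica m = true ↔
      (m.length = 3 ∧ (∀ l ∈ m, l.length = 3) ∧
        (m.flatMap (fun l => l)).Perm [1,2,3,4,5,6,7,8,9]) := by
  have hrange : PySem.List.pyRange 1 10 1 = ([1,2,3,4,5,6,7,8,9] : List Int) := by decide
  rw [eMagica, emRows_iff, hrange]
  constructor
  · rintro ⟨⟨r, hr⟩, hlen, hm⟩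
    have hperm := removeAll_perm hr
    have hflat : (m.flatMap (fun l => l)).length = 9 := by
      obtain ⟨a, b, c, rfl⟩ : ∃ a b c, m = [a, b, c] := by
        match m, hm with | [a, b, c], _ => exact ⟨a, b, c, rfl⟩
      simp [List.flatMap_cons, hlen a (by simp), hlen b (by simp), hlen c (by simp)]
    have hr0 : r = [] := by
      have h9 := hperm.length_eq
      rw [List.length_append, hflat] at h9
      simp only [List.length_cons, List.length_nil] at h9
      exact List.eq_nil_of_length_eq_zero (by omega)
    subst hr0
    exact ⟨hm, hlen, by simpa using hperm⟩
  · rintro ⟨hm, hlen, hperm⟩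
    exact ⟨removeAll_some_of_perm hperm, hlen, hm⟩

-- B's guard characterized the same way
theorem altGuard_iff (m : List (List Int)) (hm : m.length = 3) (hlen : ∀ l ∈ m, l.length = 3) :
    ((PySem.List.pyRange 1 10 1).all
        (fun k => PySem.List.count (m.flatMap (fun linha => linha)) k == 1)) = true ↔
      (m.flatMap (fun l => l)).Perm [1,2,3,4,5,6,7,8,9] := by
  have hrange : PySem.List.pyRange 1 10 1 = ([1,2,3,4,5,6,7,8,9] : List Int) := by decide
  have hflat : (m.flatMap (fun l => l)).length = 9 := by
    obtain ⟨a, b, c, rfl⟩ : ∃ a b c, m = [a, b, c] := by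
      match m, hm with | [a, b, c], _ => exact ⟨a, b, c, rfl⟩
    simp [List.flatMap_cons, hlen a (by simp), hlen b (by simp), hlen c (by simp)]
  rw [hrange, ← count_one_iff_perm _ hflat]
  simp [PySem.List.count_eq]

theorem getL1 (x y z : List Int) : PySem.List.pyGetD [x, y, z] 1 [] = y := rfl
theorem getL2 (x y z : List Int) : PySem.List.pyGetD [x, y, z] 2 [] = z := rfl
theorem getI1 (x y z : Int) : PySem.List.pyGetD [x, y, z] 1 0 = y := rfl
theorem getI2 (x y z : Int) : PySem.List.pyGetD [x, y, z] 2 0 = z := rfl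

-- the 3x3-literal case: both bodies reduce to the same eight line-sum tests
set_option maxHeartbeats 1000000 in
theorem endgame (a0 a1 a2 b0 b1 b2 c0 c1 c2 : Int)
    (hA : eMagica [[a0,a1,a2],[b0,b1,b2],[c0,c1,c2]] = true)
    (hB : ((PySem.List.pyRange 1 10 1).all
        (fun k => PySem.List.count ([[a0,a1,a2],[b0,b1,b2],[c0,c1,c2]].flatMap (fun linha => linha)) k == 1)) = true) :
    valida [[a0,a1,a2],[b0,b1,b2],[c0,c1,c2]] = valida_alt [[a0,a1,a2],[b0,b1,b2],[c0,c1,c2]] := by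
  have hr03 : PySem.List.pyRange 0 3 1 = ([0, 1, 2] : List Int) := by decide
  have hB' : ((PySem.List.pyRange 1 10 1).all
      fun k => List.count k [a0, a1, a2, b0, b1, b2, c0, c1, c2] == 1) = true := by
    simpa [PySem.List.count_eq] using hB
  simp [valida, valida_alt, hA, hB', hr03, validaLoop, valida_vetor,
    getL1, getL2, getI1, getI2]
  clear hA hB hB'
  by_cases h1 : a0 + a1 + a2 = 15 <;> by_cases h2 : b0 + b1 + b2 = 15 <;>
    by_cases h3 : c0 + c1 + c2 = 15 <;> by_cases h4 : a0 + b0 + c0 = 15 <;>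
    by_cases h5 : a1 + b1 + c1 = 15 <;> by_cases h6 : a2 + b2 + c2 = 15 <;>
    by_cases h7 : a0 + b1 + c2 = 15 <;> by_cases h8 : a2 + b1 + c0 = 15 <;>
    simp [h1, h2, h3, h4, h5, h6, h7, h8]

-- ===== VERDICT (by name: the statement is the Claim_ definition above) =====
theorem valida_spec : Claim_equal_valida := by
  intro matriz _
  unfold Spec_valida
  by_cases hA : eMagica matriz = true
  · obtain ⟨hm, hlen, hperm⟩ := (eMagica_iff matriz).1 hA
    obtain ⟨a, b, c, rfl⟩ : ∃ a b c, matriz = [a, b, c] := by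
      match matriz, hm with | [a, b, c], _ => exact ⟨a, b, c, rfl⟩
    obtain ⟨a0, a1, a2, rfl⟩ : ∃ x y z, a = [x, y, z] := by
      have := hlen a (by simp)
      match a, this with | [x, y, z], _ => exact ⟨x, y, z, rfl⟩
    obtain ⟨b0, b1, b2, rfl⟩ : ∃ x y z, b = [x, y, z] := by
      have := hlen b (by simp)
      match b, this with | [x, y, z], _ => exact ⟨x, y, z, rfl⟩
    obtain ⟨c0, c1, c2, rfl⟩ : ∃ x y z, c = [x, y, z] := by
      have := hlen c (by simp)
      match c, this with | [x, y, z], _ => exact ⟨x, y, z, rfl⟩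
    have hB : ((PySem.List.pyRange 1 10 1).all
        (fun k => PySem.List.count ([[a0,a1,a2],[b0,b1,b2],[c0,c1,c2]].flatMap (fun linha => linha)) k == 1)) = true :=
      (altGuard_iff _ hm hlen).2 hperm
    exact endgame a0 a1 a2 b0 b1 b2 c0 c1 c2 hA hB
  · -- é_mágica false: A returns False, and B's guards must fail too
    have hAfalse : eMagica matriz = false := by
      cases h : eMagica matriz
      · rfl
      · exact absurd h hA
    have hBfalse : valida_alt matriz = false := by
      by_cases hshape : matriz.length = 3 ∧ ∀ l ∈ matriz, l.length = 3
      · have hB : ((PySem.List.pyRange 1 10 1).all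
            (fun k => PySem.List.count (matriz.flatMap (fun linha => linha)) k == 1)) = false := by
          cases hg : ((PySem.List.pyRange 1 10 1).all
              (fun k => PySem.List.count (matriz.flatMap (fun linha => linha)) k == 1))
          · rfl
          · exact absurd ((eMagica_iff matriz).2
              ⟨hshape.1, hshape.2, (altGuard_iff matriz hshape.1 hshape.2).1 hg⟩) hA
        have hs : (matriz.length == 3 && matriz.all fun linha => linha.length == 3) = true := by
          simp only [Bool.and_eq_true, beq_iff_eq, List.all_eq_true]
          exact ⟨hshape.1, fun l hl => by simpa using hshape.2 l hl⟩
        simp only [valida_alt, hs, Bool.not_true, Bool.false_eq_true, if_false, hB,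
          Bool.not_false, if_true]
      · have hs : (matriz.length == 3 && matriz.all fun linha => linha.length == 3) = false := by
          rw [Bool.and_eq_false_iff]
          by_cases h3 : matriz.length = 3
          · right
            rw [List.all_eq_false]
            have hnall : ¬ ∀ l ∈ matriz, l.length = 3 := fun hall => hshape ⟨h3, hall⟩
            obtain ⟨l, hl⟩ := not_forall.1 hnall
            obtain ⟨hlm, hne⟩ := Classical.not_imp.1 hl
            exact ⟨l, hlm, by simpa using hne⟩
          · left; simpa using h3
        simp only [valida_alt, hs, Bool.not_false, if_true]
    rw [hBfalse]
    simp [valida, hAfalse]
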